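-- pv_equiv track=rewrite | github.com/dldowning/Accounting-Installer | src/helpers.py | create_state_dict
-- ===== SOURCE A (Python) =====
-- def create_state_dict(companies,company_dict):
-- 	"""
-- 	Creates dictionary of state against its list of comapnies.
-- 	e.g. {Indiana:[Company1,Company2..], Illinois:{Company1,Company3,...}}
-- 	"""
-- 	state_dict = {}
-- 	for company in companies:
-- 		state = company_dict[company]['State']
-- 		if state not in state_dict:
-- 			state_dict[state] = {'Companies':[]}
-- 		state_dict[state]['Companies'].append(company)
--
-- 	return state_dict
-- ===== SOURCE B (Python) =====
-- def create_state_dict(companies, company_dict):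
-- 	"""
-- 	Creates dictionary of state against its list of comapnies.
-- 	e.g. {Indiana:[Company1,Company2..], Illinois:{Company1,Company3,...}}
-- 	"""
-- 	pairs = [(company, company_dict[company]['State']) for company in companies]
-- 	states = list(dict.fromkeys(state for _, state in pairs))
-- 	return {state: {'Companies': [company for company, st in pairs if st == state]}
-- 	        for state in states}
-- ===== Notes on version B (the rewrite author's own statement) =====
-- stated objective: alternative
-- what changed: Replaces A's single-pass incremental dict build (insert-empty-then-append per company) by a two-phase grouping: precompute all (company, state) pairs, dedupe the states in first-occurrence order, then build the result as one dict comprehension that filters the pair list per state.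
import Mathlib
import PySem

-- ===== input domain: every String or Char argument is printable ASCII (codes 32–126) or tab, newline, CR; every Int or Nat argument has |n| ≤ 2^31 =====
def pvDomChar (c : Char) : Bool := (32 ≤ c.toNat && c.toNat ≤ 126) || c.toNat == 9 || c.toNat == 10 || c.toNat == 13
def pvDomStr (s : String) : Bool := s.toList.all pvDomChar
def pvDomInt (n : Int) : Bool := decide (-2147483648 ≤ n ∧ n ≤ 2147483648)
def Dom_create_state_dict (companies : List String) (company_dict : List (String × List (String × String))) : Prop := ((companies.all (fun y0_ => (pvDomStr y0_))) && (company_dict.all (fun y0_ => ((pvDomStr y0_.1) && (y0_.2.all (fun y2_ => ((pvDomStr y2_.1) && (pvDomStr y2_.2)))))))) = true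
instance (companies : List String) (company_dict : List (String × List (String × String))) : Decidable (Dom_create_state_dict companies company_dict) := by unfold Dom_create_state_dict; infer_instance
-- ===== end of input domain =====

-- B replaces A's single-pass incremental dict build by a two-phase grouping (dedupe states, then filter per state); same cost class, alternative structure.


-- ===== PORT A =====
-- company_dict[company]['State'] — total form (getD); Pre_ guarantees both lookups succeed, so the defaults are never the value used.
def pvState (company_dict : List (String × List (String × String))) (c : String) : String :=
  PySem.Dict.getD (PySem.Dict.mk (PySem.Dict.getD (PySem.Dict.mk company_dict) c [])) "State" ""

-- the fresh inner dict {'Companies': []}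
def pvInner0 : PySem.Dict String (List String) := PySem.Dict.mk [("Companies", ([] : List String))]

def create_state_dict (companies : List String) (company_dict : List (String × List (String × String))) : List (String × List (String × List String)) :=
  let state_dict : PySem.Dict String (PySem.Dict String (List String)) :=
    companies.foldl (fun d company =>
      let state := pvState company_dict company
      let d := if !(d.contains state) then d.insert state pvInner0 else d
      -- state_dict[state]['Companies'].append(company) (key 'state' is present here; pvInner0 is an unused default)
      d.modify state pvInner0 (fun inner => inner.modify "Companies" [] (fun l => l ++ [company]))
    ) PySem.Dict.empty
  state_dict.items.map (fun p => (p.1, p.2.items))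

-- ===== PORT B =====
def create_state_dict_alt (companies : List String) (company_dict : List (String × List (String × String))) : List (String × List (String × List String)) :=
  let pairs := companies.map (fun company => (company, pvState company_dict company))
  let states := PySem.List.dedup (pairs.map (·.2))
  states.map (fun state =>
    (state, [("Companies", (pairs.filter (fun p => p.2 == state)).map (·.1))]))

-- ===== PRECONDITION & SPEC =====
-- Pre_ excludes exactly the inputs where Python A raises KeyError: a listed company missing
-- from company_dict, or whose record has no 'State' key.
def Pre_create_state_dict (companies : List String) (company_dict : List (String × List (String × String))) : Prop :=
  ∀ c ∈ companies,
    (((PySem.Dict.mk company_dict).get? c).bind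
      (fun inner => (PySem.Dict.mk inner).get? "State")).isSome = true
instance (companies : List String) (company_dict : List (String × List (String × String))) : Decidable (Pre_create_state_dict companies company_dict) := by unfold Pre_create_state_dict; infer_instance

def pvWitness_create_state_dict : List String × (List (String × List (String × String))) :=
  (["acme", "zeta", "acme"], [("acme", [("State", "IN")]), ("zeta", [("State", "IL")])])

def Spec_create_state_dict (companies : List String) (company_dict : List (String × List (String × String))) (out : List (String × List (String × List String))) : Prop := out = create_state_dict_alt companies company_dict
instance (companies : List String) (company_dict : List (String × List (String × String))) (out : List (String × List (String × List String))) : Decidable (Spec_create_state_dict companies company_dict out) := by unfold Spec_create_state_dict; infer_instance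

-- ===== CLAIM (what is proved, stated in full; the proofs are below) =====
def Claim_equal_create_state_dict : Prop := ∀ (companies : List String) (company_dict : List (String × List (String × String))), Dom_create_state_dict companies company_dict → Pre_create_state_dict companies company_dict → Spec_create_state_dict companies company_dict (create_state_dict companies company_dict)

-- ===== LEMMAS AND PROOFS =====

-- A's loop body (ensure-key-then-append) is one 'modify' with default pvInner0.
lemma pvStepA_eq_modify (d : PySem.Dict String (PySem.Dict String (List String))) (s : String)
    (fa : PySem.Dict String (List String) → PySem.Dict String (List String)) :
    (if !(d.contains s) then d.insert s pvInner0 else d).modify s pvInner0 fa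
      = d.modify s pvInner0 fa := by
  by_cases h : d.contains s = true
  · simp [h]
  · simp only [h, Bool.not_false, if_pos]
    simp [PySem.Dict.modify, PySem.Dict.getD_insert_self, PySem.Dict.insert_insert_self,
      PySem.Dict.getD_of_not_contains _ _ (by simpa using h)]

-- appending into the one-key inner dict {'Companies': xs}
lemma pvInnerFoldl (l : List String) (xs : List String) :
    l.foldl (fun inner c => inner.modify "Companies" [] (fun t => t ++ [c]))
      (PySem.Dict.mk [("Companies", xs)])
      = PySem.Dict.mk [("Companies", xs ++ l)] := by
  induction l generalizing xs with
  | nil => simp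
  | cons c l ih =>
    simp only [List.foldl_cons]
    have h1 : (PySem.Dict.mk [("Companies", xs)]).modify "Companies" [] (fun t => t ++ [c])
        = PySem.Dict.mk [("Companies", xs ++ [c])] := by
      simp [PySem.Dict.modify, PySem.Dict.insert, PySem.Dict.getD, PySem.Dict.get?,
        PySem.Dict.contains]
    rw [h1, ih]
    simp

-- value of A's loop at key s: the companies with state s, folded into the inner dict
lemma pvLoopGetD (cd : List (String × List (String × String))) (L : List String)
    (d : PySem.Dict String (PySem.Dict String (List String))) (s : String) :
    (L.foldl (fun d c => d.modify (pvState cd c) pvInner0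
        (fun inner => inner.modify "Companies" [] (fun t => t ++ [c]))) d).getD s pvInner0
      = (L.filter (fun c => pvState cd c == s)).foldl
          (fun inner c => inner.modify "Companies" [] (fun t => t ++ [c])) (d.getD s pvInner0) := by
  induction L generalizing d with
  | nil => simp
  | cons c L ih =>
    simp only [List.foldl_cons, List.filter_cons]
    rw [ih]
    by_cases h : pvState cd c = s
    · simp [h]
    · have hb : (pvState cd c == s) = false := by simpa using h
      rw [hb]
      simp only [Bool.false_eq_true, if_neg, not_false_eq_true]
      congr 1
      rw [PySem.Dict.getD_modify]
      simp [Ne.symm h]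

-- ===== VERDICT (by name: the statement is the Claim_ definition above) =====
theorem create_state_dict_spec : Claim_equal_create_state_dict := by
  intro companies company_dict _dom _pre
  unfold Spec_create_state_dict create_state_dict create_state_dict_alt
  simp only []
  -- merge A's two-step body into a single modify
  have hstep : (fun (d : PySem.Dict String (PySem.Dict String (List String))) (company : String) =>
      (if !(d.contains (pvState company_dict company)) then d.insert (pvState company_dict company) pvInner0 else d).modify
        (pvState company_dict company) pvInner0
        (fun inner => inner.modify "Companies" [] (fun l => l ++ [company])))
      = (fun d company => d.modify (pvState company_dict company) pvInner0
          (fun inner => inner.modify "Companies" [] (fun l => l ++ [company]))) := by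
    funext d company
    exact pvStepA_eq_modify d (pvState company_dict company) _
  rw [hstep]
  set D := companies.foldl (fun d company => d.modify (pvState company_dict company) pvInner0
      (fun inner => inner.modify "Companies" [] (fun l => l ++ [company]))) PySem.Dict.empty with hD
  have hnodup : D.keys.Nodup := by
    rw [hD]
    exact PySem.Dict.nodup_keys_foldl_modify_key companies (fun c => pvState company_dict c)
      pvInner0 (fun _ c => fun inner => inner.modify "Companies" [] (fun l => l ++ [c]))
      PySem.Dict.empty (by simp)
  have hkeys : D.keys = PySem.Set.ofList (companies.map (fun c => pvState company_dict c)) := by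
    rw [hD]
    rw [PySem.Dict.keys_foldl_modify_key companies (fun c => pvState company_dict c)
      pvInner0 (fun _ c => fun inner => inner.modify "Companies" [] (fun l => l ++ [c]))
      PySem.Dict.empty]
    simp [PySem.Set.update_nil_left]
  have hval : ∀ s, D.getD s pvInner0
      = PySem.Dict.mk [("Companies", companies.filter (fun c => pvState company_dict c == s))] := by
    intro s
    rw [hD, pvLoopGetD]
    have : (PySem.Dict.empty : PySem.Dict String (PySem.Dict String (List String))).getD s pvInner0 = pvInner0 := by
      simp [PySem.Dict.getD, PySem.Dict.get?, PySem.Dict.empty]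
    rw [this]
    exact pvInnerFoldl _ []
  rw [PySem.Dict.items_eq_map_keys D hnodup pvInner0, hkeys]
  simp only [List.map_map]
  apply List.map_congr_left
  intro s _
  simp only [Function.comp]
  rw [hval s]
  -- B side: the filtered pair list projects to the filtered company list
  simp [List.filter_map, List.map_map, Function.comp_def]
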